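-- pv_equiv track=rewrite | github.com/cotoirares/university | Semester_01/Fundamentals of Programming/Assignment 05/program.py | separation_function_of_the_real_part_and_imaginary_part_for_a_complex_number_entered_by_user
-- ===== SOURCE A (Python) =====
-- def separation_function_of_the_real_part_and_imaginary_part_for_a_complex_number_entered_by_user(number_input) -> (
--         int, int):
--     NULL = 0
--     MINIMUM_ASCII_FOR_DIGIT = '0'
--     MAXIMUM_ASCII_FOR_DIGIT = '9'
--     BASE = 10
--     UNIT = 1
--     real_part = NULL
--     imaginary_part = NULL
--     presence_of_operation = NULL
--     for x in number_input:
--         if MINIMUM_ASCII_FOR_DIGIT <= x <= MAXIMUM_ASCII_FOR_DIGIT: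
--             if presence_of_operation == NULL:
--                 real_part = real_part * BASE + int(x)
--             else:
--                 imaginary_part = imaginary_part * BASE + int(x)
--         elif x == '+' or x == '-':
--             presence_of_operation = UNIT
--         else:
--             continue
--     return real_part, imaginary_part
-- ===== SOURCE B (Python) =====
-- def _digits_value(text):
--     digits = ''.join(c for c in text if '0' <= c <= '9')
--     return int(digits) if digits else 0
--
--
-- def separation_function_of_the_real_part_and_imaginary_part_for_a_complex_number_entered_by_user(number_input) -> (
--         int, int):
--     idx = next((i for i, c in enumerate(number_input) if c == '+' or c == '-'), None)
--     if idx is None: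
--         real_text, imag_text = number_input, ''
--     else:
--         real_text, imag_text = number_input[:idx], number_input[idx + 1:]
--     return _digits_value(real_text), _digits_value(imag_text)
-- ===== Notes on version B (the rewrite author's own statement) =====
-- stated objective: alternative
-- what changed: Replaces the single fused digit-accumulator loop with a locate-first-sign, split the string, then filter-digits-and-int() parse of each piece.
import Mathlib
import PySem

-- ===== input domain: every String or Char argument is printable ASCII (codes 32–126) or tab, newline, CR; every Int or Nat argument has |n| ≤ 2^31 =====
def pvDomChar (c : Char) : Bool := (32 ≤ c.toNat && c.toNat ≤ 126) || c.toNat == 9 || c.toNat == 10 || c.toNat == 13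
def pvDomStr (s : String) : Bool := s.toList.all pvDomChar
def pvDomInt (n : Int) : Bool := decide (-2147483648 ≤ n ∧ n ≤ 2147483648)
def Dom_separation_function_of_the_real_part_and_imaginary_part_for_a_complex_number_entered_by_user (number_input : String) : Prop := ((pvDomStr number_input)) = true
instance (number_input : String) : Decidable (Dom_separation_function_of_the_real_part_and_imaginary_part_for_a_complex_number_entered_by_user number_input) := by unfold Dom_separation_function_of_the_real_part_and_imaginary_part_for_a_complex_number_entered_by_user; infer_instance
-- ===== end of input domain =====

-- B replaces A's fused one-pass accumulator with locate-first-sign / split / parse-each-piece (alternative decomposition, same cost).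

-- ===== PORT A =====
-- '0' <= x <= '9' as a Bool test (shared by both ports; a plain char-range check)
def pvIsDigit (c : Char) : Bool := '0' ≤ c && c ≤ '9'

-- the loop body of A: state is (real_part, imaginary_part, presence_of_operation)
def pvStepA (st : Int × Int × Int) (x : Char) : Int × Int × Int :=
  if pvIsDigit x then
    if st.2.2 == 0 then (st.1 * 10 + ((x.toNat : Int) - 48), st.2.1, st.2.2)
    else (st.1, st.2.1 * 10 + ((x.toNat : Int) - 48), st.2.2)
  else if x == '+' || x == '-' then (st.1, st.2.1, 1)
  else st

def separation_function_of_the_real_part_and_imaginary_part_for_a_complex_number_entered_by_user (number_input : String) : Int × Int :=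
  let st := number_input.toList.foldl pvStepA (0, 0, 0)
  (st.1, st.2.1)

-- ===== PORT B =====
def pvIsSign (c : Char) : Bool := c == '+' || c == '-'

-- _digits_value: keep the digit chars, then int(...) (0 for the empty digit string)
def pvDigitsValue (text : List Char) : Int :=
  (text.filter pvIsDigit).foldl (fun a c => a * 10 + ((c.toNat : Int) - 48)) 0

def separation_function_of_the_real_part_and_imaginary_part_for_a_complex_number_entered_by_user_alt (number_input : String) : Int × Int :=
  let l := number_input.toList
  match l.findIdx? pvIsSign with
  | none => (pvDigitsValue l, pvDigitsValue [])
  | some j => (pvDigitsValue (l.take j), pvDigitsValue (l.drop (j + 1)))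

-- ===== PRECONDITION & SPEC =====
def Spec_separation_function_of_the_real_part_and_imaginary_part_for_a_complex_number_entered_by_user (number_input : String) (out : Int × Int) : Prop := out = separation_function_of_the_real_part_and_imaginary_part_for_a_complex_number_entered_by_user_alt number_input
instance (number_input : String) (out : Int × Int) : Decidable (Spec_separation_function_of_the_real_part_and_imaginary_part_for_a_complex_number_entered_by_user number_input out) := by unfold Spec_separation_function_of_the_real_part_and_imaginary_part_for_a_complex_number_entered_by_user; infer_instance

-- ===== CLAIM (what is proved, stated in full; the proofs are below) =====
def Claim_equal_separation_function_of_the_real_part_and_imaginary_part_for_a_complex_number_entered_by_user : Prop := ∀ (number_input : String), Dom_separation_function_of_the_real_part_and_imaginary_part_for_a_complex_number_entered_by_user number_input → Spec_separation_function_of_the_real_part_and_imaginary_part_for_a_complex_number_entered_by_user number_input (separation_function_of_the_real_part_and_imaginary_part_for_a_complex_number_entered_by_user number_input)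

-- ===== LEMMAS AND PROOFS =====

-- digit accumulation over a char list, skipping non-digits
def pvParseAcc (a : Int) (l : List Char) : Int :=
  l.foldl (fun a c => if pvIsDigit c then a * 10 + ((c.toNat : Int) - 48) else a) a

lemma pvDigitsValue_eq_parseAcc (l : List Char) :
    pvDigitsValue l = pvParseAcc 0 l := by
  unfold pvDigitsValue pvParseAcc
  exact (PySem.List.foldl_if_eq_foldl_filter pvIsDigit _ _ _).symm

-- once presence_of_operation = 1, A accumulates only the imaginary part
lemma pvFoldA_post (l : List Char) : ∀ r i,
    l.foldl pvStepA (r, i, 1) = (r, pvParseAcc i l, 1) := by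
  induction l with
  | nil => intro r i; simp [pvParseAcc]
  | cons c t ih =>
    intro r i
    simp only [List.foldl_cons, pvStepA, pvParseAcc, List.foldl_cons]
    by_cases hd : pvIsDigit c
    · simp [hd, ih, pvParseAcc]
    · by_cases hs : (c == '+' || c == '-') = true
      · simp [hd, hs, ih, pvParseAcc]
      · simp [hd, hs, ih, pvParseAcc]

-- main invariant: before any sign A accumulates the real part; after the first sign, the imaginary part
lemma pvFoldA_main (l : List Char) : ∀ r,
    (l.foldl pvStepA (r, 0, 0)).1 = pvParseAcc r (l.takeWhile (fun c => !pvIsSign c)) ∧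
    (l.foldl pvStepA (r, 0, 0)).2.1 = pvParseAcc 0 ((l.dropWhile (fun c => !pvIsSign c)).drop 1) := by
  induction l with
  | nil => intro r; simp [pvParseAcc]
  | cons c t ih =>
    intro r
    by_cases hs : pvIsSign c
    · have hsb : (c == '+' || c == '-') = true := hs
      have hd : pvIsDigit c = false := by
        rcases (by simpa using hsb : c = '+' ∨ c = '-') with h | h <;> subst h <;> decide
      simp [List.foldl_cons, pvStepA, hd, hsb, hs, pvFoldA_post, pvParseAcc]
    · by_cases hd : pvIsDigit c
      · have hns : pvIsSign c = false := by simpa using hs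
        simp only [List.foldl_cons, pvStepA, hd]
        simpa [hns, pvParseAcc, hd] using ih (r * 10 + ((c.toNat : Int) - 48))
      · have hns : pvIsSign c = false := by simpa using hs
        have hsb : (c == '+' || c == '-') = false := hns
        simp only [List.foldl_cons, pvStepA, hd, hsb]
        simpa [hns, pvParseAcc, hd] using ih r

-- the findIdx?-based split equals the takeWhile/dropWhile split
lemma pvSplit_none (l : List Char) (h : l.findIdx? pvIsSign = none) :
    l.takeWhile (fun c => !pvIsSign c) = l ∧ l.dropWhile (fun c => !pvIsSign c) = [] := by
  induction l with
  | nil => simp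
  | cons c t ih =>
    rw [List.findIdx?_cons] at h
    by_cases hc : pvIsSign c
    · simp [hc] at h
    · have h' : t.findIdx? pvIsSign = none := by
        simpa [hc, Option.map_eq_none_iff] using h
      rcases ih h' with ⟨h1, h2⟩
      refine ⟨?_, ?_⟩
      · simp [hc, h1]
      · simp [hc, h2]

lemma pvSplit_some (l : List Char) : ∀ j, l.findIdx? pvIsSign = some j →
    l.take j = l.takeWhile (fun c => !pvIsSign c) ∧
    l.drop (j + 1) = (l.dropWhile (fun c => !pvIsSign c)).drop 1 := by
  induction l with
  | nil => intro j h; simp at h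
  | cons c t ih =>
    intro j h
    rw [List.findIdx?_cons] at h
    by_cases hc : pvIsSign c
    · simp [hc] at h
      subst h
      simp [hc]
    · simp [hc] at h
      rcases h with ⟨j', hj', rfl⟩
      rcases ih j' hj' with ⟨h1, h2⟩
      simp [hc, h1, h2]

-- ===== VERDICT (by name: the statement is the Claim_ definition above) =====
theorem separation_function_of_the_real_part_and_imaginary_part_for_a_complex_number_entered_by_user_spec : Claim_equal_separation_function_of_the_real_part_and_imaginary_part_for_a_complex_number_entered_by_user := by
  intro s _
  unfold Spec_separation_function_of_the_real_part_and_imaginary_part_for_a_complex_number_entered_by_user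
  unfold separation_function_of_the_real_part_and_imaginary_part_for_a_complex_number_entered_by_user
  unfold separation_function_of_the_real_part_and_imaginary_part_for_a_complex_number_entered_by_user_alt
  rcases pvFoldA_main s.toList 0 with ⟨h1, h2⟩
  cases hfi : s.toList.findIdx? pvIsSign with
  | none =>
    rcases pvSplit_none s.toList hfi with ⟨ht, hd⟩
    simp [hfi, h1, h2, ht, hd, pvDigitsValue_eq_parseAcc, pvParseAcc]
  | some j =>
    rcases pvSplit_some s.toList j hfi with ⟨ht, hd⟩
    simp [hfi, h1, h2, ht, hd, pvDigitsValue_eq_parseAcc]
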